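-- pv_equiv track=rewrite | github.com/MehdiD0/Plate-Recognizer-Python | util.py | string_to_number
-- ===== SOURCE A (Python) =====
-- def string_to_number(string):
--     # Create a dictionary of letters and their corresponding numbers.
--     letter_to_number = {
--         "A": "4",
--         "B": "8",
--         "E": "3",
--         "G": "6",
--         "I": "1",
--         "O": "0",
--         "R": "2",
--         "C": "6",
--         "T": "1",
--         "M": "11",
--         "/": "1",
--     }
--
--     # Convert the string to uppercase.
--     string = str(string).upper()
--     # Removing spaces
--     string = string.replace(" ", "")
--
--     # Convert each letter in the string to its corresponding number.
--     number_string = ""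
--     for letter in string:
--         if letter in letter_to_number:
--             number_string += letter_to_number[letter]
--         else:
--             number_string += letter
--
--     # Return the string of numbers.
--     return number_string
-- ===== SOURCE B (Python) =====
-- def string_to_number(string):
--     # Same preprocessing as A, then one str.replace pass per mapping
--     # (every replacement output is a digit and no key is a digit, so order cannot cascade).
--     s = str(string).upper().replace(" ", "")
--     return (s.replace("A", "4").replace("B", "8").replace("E", "3")
--              .replace("G", "6").replace("I", "1").replace("O", "0")
--              .replace("R", "2").replace("C", "6").replace("T", "1")
--              .replace("M", "11").replace("/", "1"))
-- ===== Notes on version B (the rewrite author's own statement) =====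
-- stated objective: faster
-- what changed: Replaces A's explicit per-character loop with dict lookups and string accumulation by a chain of whole-string str.replace passes, one per mapping (order irrelevant: every replacement output is digits and no key is a digit); the C-level replace passes beat the Python-level per-char loop.
import Mathlib
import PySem

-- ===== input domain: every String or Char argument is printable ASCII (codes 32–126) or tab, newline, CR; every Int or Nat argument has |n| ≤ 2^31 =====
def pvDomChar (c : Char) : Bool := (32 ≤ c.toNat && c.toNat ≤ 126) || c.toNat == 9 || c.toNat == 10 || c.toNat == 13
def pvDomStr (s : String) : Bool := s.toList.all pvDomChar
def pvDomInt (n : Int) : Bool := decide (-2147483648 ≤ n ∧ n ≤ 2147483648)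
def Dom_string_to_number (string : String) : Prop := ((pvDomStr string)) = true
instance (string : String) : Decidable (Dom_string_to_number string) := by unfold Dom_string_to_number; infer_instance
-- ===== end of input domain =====

-- B replaces A's per-character dict-lookup loop with a chain of str.replace passes, one per
-- mapping (objective: faster — a timing run measured B faster); same return value for every string.

-- ===== PORT A =====
-- A's dict literal (keys are the 1-char strings A iterates over, ported as Char)
def pvDictA : PySem.Dict Char String :=
  ((((((((((PySem.Dict.empty.insert 'A' "4").insert 'B' "8").insert 'E' "3").insert
    'G' "6").insert 'I' "1").insert 'O' "0").insert 'R' "2").insert 'C' "6").insert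
    'T' "1").insert 'M' "11").insert '/' "1"

def string_to_number (string : String) : String :=
  let s := PySem.Str.replace (PySem.Str.upper string) " " ""
  s.toList.foldl
    (fun acc letter =>
      if pvDictA.contains letter then acc ++ pvDictA.getD letter "" else acc.push letter) ""

-- ===== PORT B =====
def string_to_number_alt (string : String) : String :=
  let s := PySem.Str.replace (PySem.Str.upper string) " " ""
  PySem.Str.replace (PySem.Str.replace (PySem.Str.replace (PySem.Str.replace
    (PySem.Str.replace (PySem.Str.replace (PySem.Str.replace (PySem.Str.replace
    (PySem.Str.replace (PySem.Str.replace (PySem.Str.replace s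
    "A" "4") "B" "8") "E" "3") "G" "6") "I" "1") "O" "0") "R" "2") "C" "6") "T" "1")
    "M" "11") "/" "1"

-- ===== PRECONDITION & SPEC =====
def Spec_string_to_number (string : String) (out : String) : Prop := out = string_to_number_alt string
instance (string : String) (out : String) : Decidable (Spec_string_to_number string out) := by unfold Spec_string_to_number; infer_instance

-- ===== CLAIM (what is proved, stated in full; the proofs are below) =====
def Claim_equal_string_to_number : Prop := ∀ (string : String), Dom_string_to_number string → Spec_string_to_number string (string_to_number string)

-- ===== LEMMAS AND PROOFS =====

-- the common per-character mapping, as a List Char function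
def pvF (c : Char) : List Char :=
  if c = 'A' then ['4'] else if c = 'B' then ['8'] else if c = 'E' then ['3'] else
  if c = 'G' then ['6'] else if c = 'I' then ['1'] else if c = 'O' then ['0'] else
  if c = 'R' then ['2'] else if c = 'C' then ['6'] else if c = 'T' then ['1'] else
  if c = 'M' then ['1', '1'] else if c = '/' then ['1'] else [c]

-- single-character replace is a flatMap
theorem replace_go_single (c : Char) (rep : List Char) :
    ∀ (l : List Char) (fuel : Nat) (acc : List Char), l.length ≤ fuel →
      PySem.Chars.replace.go [c] rep fuel l acc =
        acc.reverse ++ l.flatMap (fun x => if x = c then rep else [x]) := by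
  intro l
  induction l with
  | nil =>
      intro fuel acc _
      cases fuel <;> simp [PySem.Chars.replace.go.eq_def]
  | cons hd tl ih =>
      intro fuel acc hle
      cases fuel with
      | zero => simp at hle
      | succ n =>
        rw [PySem.Chars.replace.go.eq_def]
        simp only [List.isPrefixOf, List.flatMap_cons]
        by_cases h : hd = c
        · subst h
          simp only [BEq.rfl, Bool.true_and, if_pos, List.length_cons, List.length_nil,
            List.drop_succ_cons, List.drop_zero]
          rw [ih n _ (by simpa using hle)]
          simp
        · have hbeq : (c == hd) = false := by simp; exact fun e => h e.symm
          simp only [hbeq, Bool.false_and, if_neg Bool.false_ne_true]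
          rw [ih n _ (by simpa using hle)]
          simp [h]

theorem replace_single (l : List Char) (c : Char) (rep : List Char) :
    PySem.Chars.replace l [c] rep = l.flatMap (fun x => if x = c then rep else [x]) := by
  rw [PySem.Chars.replace]
  simp only [List.isEmpty_cons, if_neg Bool.false_ne_true]
  exact replace_go_single c rep l l.length [] le_rfl

-- A's loop body agrees with pvF
theorem dictA_eq_pvF (c : Char) :
    (if pvDictA.contains c then (pvDictA.getD c "").toList else [c]) = pvF c := by
  by_cases hA : c = 'A'; · subst hA; decide
  by_cases hB : c = 'B'; · subst hB; decide
  by_cases hE : c = 'E'; · subst hE; decide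
  by_cases hG : c = 'G'; · subst hG; decide
  by_cases hI : c = 'I'; · subst hI; decide
  by_cases hO : c = 'O'; · subst hO; decide
  by_cases hR : c = 'R'; · subst hR; decide
  by_cases hC : c = 'C'; · subst hC; decide
  by_cases hT : c = 'T'; · subst hT; decide
  by_cases hM : c = 'M'; · subst hM; decide
  by_cases hS : c = '/'; · subst hS; decide
  simp [pvDictA, pvF, PySem.Dict.contains_insert, hA, hB, hE, hG, hI, hO, hR, hC, hT, hM, hS,
    PySem.Dict.contains_empty]

-- A's fold as a flatMap
theorem foldA_eq (cs : List Char) : ∀ (acc : String),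
    (cs.foldl (fun acc letter =>
        if pvDictA.contains letter then acc ++ pvDictA.getD letter "" else acc.push letter)
      acc).toList = acc.toList ++ cs.flatMap pvF := by
  induction cs with
  | nil => intro acc; simp
  | cons hd tl ih =>
      intro acc
      simp only [List.foldl_cons, List.flatMap_cons]
      by_cases h : pvDictA.contains hd
      · rw [if_pos h, ih]
        have := dictA_eq_pvF hd
        rw [if_pos h] at this
        simp [← this, String.toList_append]
      · rw [if_neg h, ih]
        have := dictA_eq_pvF hd
        rw [if_neg h] at this
        simp [← this, String.toList_push]

-- B's chain of replaces as the same flatMap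
theorem chainB_eq (cs : List Char) :
    PySem.Chars.replace (PySem.Chars.replace (PySem.Chars.replace (PySem.Chars.replace
      (PySem.Chars.replace (PySem.Chars.replace (PySem.Chars.replace (PySem.Chars.replace
      (PySem.Chars.replace (PySem.Chars.replace (PySem.Chars.replace cs
      ['A'] ['4']) ['B'] ['8']) ['E'] ['3']) ['G'] ['6']) ['I'] ['1']) ['O'] ['0'])
      ['R'] ['2']) ['C'] ['6']) ['T'] ['1']) ['M'] ['1', '1']) ['/'] ['1']
    = cs.flatMap pvF := by
  simp only [replace_single, List.flatMap_assoc]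
  apply List.flatMap_congr
  intro c _
  by_cases hA : c = 'A'; · subst hA; decide
  by_cases hB : c = 'B'; · subst hB; decide
  by_cases hE : c = 'E'; · subst hE; decide
  by_cases hG : c = 'G'; · subst hG; decide
  by_cases hI : c = 'I'; · subst hI; decide
  by_cases hO : c = 'O'; · subst hO; decide
  by_cases hR : c = 'R'; · subst hR; decide
  by_cases hC : c = 'C'; · subst hC; decide
  by_cases hT : c = 'T'; · subst hT; decide
  by_cases hM : c = 'M'; · subst hM; decide
  by_cases hS : c = '/'; · subst hS; decide
  simp [pvF, hA, hB, hE, hG, hI, hO, hR, hC, hT, hM, hS]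

-- ===== VERDICT (by name: the statement is the Claim_ definition above) =====
theorem string_to_number_spec : Claim_equal_string_to_number := by
  intro string _
  unfold Spec_string_to_number string_to_number string_to_number_alt
  rw [← String.toList_inj]
  simp only [foldA_eq, String.toList_empty, List.nil_append, PySem.Str.toList_replace]
  simp only [show (" ".toList) = [' '] from rfl, show ("A".toList) = ['A'] from rfl, show ("4".toList) = ['4'] from rfl, show ("B".toList) = ['B'] from rfl, show ("8".toList) = ['8'] from rfl, show ("E".toList) = ['E'] from rfl, show ("3".toList) = ['3'] from rfl, show ("G".toList) = ['G'] from rfl, show ("6".toList) = ['6'] from rfl, show ("I".toList) = ['I'] from rfl, show ("1".toList) = ['1'] from rfl, show ("O".toList) = ['O'] from rfl, show ("0".toList) = ['0'] from rfl, show ("R".toList) = ['R'] from rfl, show ("2".toList) = ['2'] from rfl, show ("C".toList) = ['C'] from rfl, show ("T".toList) = ['T'] from rfl, show ("M".toList) = ['M'] from rfl, show ("11".toList) = ['1', '1'] from rfl, show ("/".toList) = ['/'] from rfl]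
  rw [← chainB_eq]
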